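-- pv_equiv track=rewrite | github.com/ThomasAger/ThesisPipeline | src/data/webapi.py | getTotalWordArray
-- ===== SOURCE A (Python) =====
-- def getTotalWordArray(main, secondary, tertiary):
--     words = []
--     for m in main:
--         words.append(m)
--         for s in secondary:
--             words.append(m + " " + s)
--             for t in tertiary:
--                 words.append(m + " " + s + " " + t)
--     return words
-- ===== SOURCE B (Python) =====
-- def getTotalWordArray(main, secondary, tertiary):
--     def rec(levels, prefix):
--         words = []
--         for item in levels[0]:
--             s = item if prefix is None else prefix + " " + item
--             words.append(s)
--             if len(levels) > 1:
--                 words.extend(rec(levels[1:], s))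
--         return words
--     return rec([main, secondary, tertiary], None)
-- ===== Notes on version B (the rewrite author's own statement) =====
-- stated objective: alternative
-- what changed: Replaces the hard-coded triple-nested loop by a generic preorder recursion over a list of levels, extending each prefix with a space-joined item.
import Mathlib
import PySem

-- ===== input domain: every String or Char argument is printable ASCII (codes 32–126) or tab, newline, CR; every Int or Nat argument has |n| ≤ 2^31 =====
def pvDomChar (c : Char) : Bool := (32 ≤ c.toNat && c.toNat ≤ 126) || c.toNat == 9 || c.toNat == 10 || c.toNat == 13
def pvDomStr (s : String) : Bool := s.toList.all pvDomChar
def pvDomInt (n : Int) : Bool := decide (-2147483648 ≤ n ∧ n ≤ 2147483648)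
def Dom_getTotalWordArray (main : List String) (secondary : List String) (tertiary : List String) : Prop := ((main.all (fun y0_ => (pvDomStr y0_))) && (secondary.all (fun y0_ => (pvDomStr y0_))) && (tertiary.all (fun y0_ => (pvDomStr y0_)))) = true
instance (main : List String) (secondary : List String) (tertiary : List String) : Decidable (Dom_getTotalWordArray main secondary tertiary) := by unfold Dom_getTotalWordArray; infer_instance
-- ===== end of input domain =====

-- B replaces the hard-coded triple-nested loop by a generic preorder recursion over a list of levels (alternative decomposition, same cost).


-- ===== PORT A =====
def getTotalWordArray (main : List String) (secondary : List String) (tertiary : List String) : List String :=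
  main.foldl (fun words m =>
    let words := words ++ [m]
    secondary.foldl (fun words s =>
      let words := words ++ [m ++ " " ++ s]
      tertiary.foldl (fun words t => words ++ [m ++ " " ++ s ++ " " ++ t]) words) words) []

-- ===== PORT B =====
-- rec(levels, prefix): for item in levels[0]: s = item if prefix is None else prefix+" "+item;
-- append s; if len(levels) > 1: extend with rec(levels[1:], s)
def gtwaRec : List (List String) → Option String → List String
  | [], _ => []
  | lvl :: rest, pfx =>
    lvl.foldl (fun words item =>
      let s := match pfx with | none => item | some p => p ++ " " ++ item
      let words := words ++ [s]
      if rest.isEmpty then words else words ++ gtwaRec rest (some s)) []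

def getTotalWordArray_alt (main : List String) (secondary : List String) (tertiary : List String) : List String :=
  gtwaRec [main, secondary, tertiary] none

-- ===== PRECONDITION & SPEC =====
def Spec_getTotalWordArray (main : List String) (secondary : List String) (tertiary : List String) (out : List String) : Prop := out = getTotalWordArray_alt main secondary tertiary
instance (main : List String) (secondary : List String) (tertiary : List String) (out : List String) : Decidable (Spec_getTotalWordArray main secondary tertiary out) := by unfold Spec_getTotalWordArray; infer_instance

-- ===== CLAIM (what is proved, stated in full; the proofs are below) =====
def Claim_equal_getTotalWordArray : Prop := ∀ (main : List String) (secondary : List String) (tertiary : List String), Dom_getTotalWordArray main secondary tertiary → Spec_getTotalWordArray main secondary tertiary (getTotalWordArray main secondary tertiary)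

-- ===== LEMMAS AND PROOFS =====

theorem foldl_cons_step (l : List String) (f : String → String) (g : String → List String)
    (acc : List String) :
    l.foldl (fun w x => (w ++ [f x]) ++ g x) acc = acc ++ l.flatMap (fun x => f x :: g x) := by
  induction l generalizing acc with
  | nil => simp
  | cons x xs ih => simp [ih, List.flatMap_def]

theorem gtwaRec_cons (lvl : List String) (rest : List (List String)) (pfx : Option String) :
    gtwaRec (lvl :: rest) pfx = lvl.foldl (fun words item =>
      let s := match pfx with | none => item | some p => p ++ " " ++ item
      let words := words ++ [s]
      if rest.isEmpty then words else words ++ gtwaRec rest (some s)) [] := by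
  simp [gtwaRec]

theorem gtwaRec_one (t : List String) (p : String) :
    gtwaRec [t] (some p) = t.map (fun z => p ++ " " ++ z) := by
  rw [gtwaRec_cons]
  simp only [List.isEmpty_nil, ite_true, PySem.List.foldl_append_singleton_eq_map,
    List.nil_append]

theorem gtwaRec_two (s t : List String) (p : String) :
    gtwaRec [s, t] (some p)
      = s.flatMap (fun y => (p ++ " " ++ y) :: t.map (fun z => p ++ " " ++ y ++ " " ++ z)) := by
  rw [gtwaRec_cons]
  simp only [List.isEmpty_cons, Bool.false_eq_true, if_false, gtwaRec_one]
  exact foldl_cons_step s _ _ []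

theorem gtwaRec_three (m s t : List String) :
    gtwaRec [m, s, t] none
      = m.flatMap (fun x => x ::
          s.flatMap (fun y => (x ++ " " ++ y) :: t.map (fun z => x ++ " " ++ y ++ " " ++ z))) := by
  rw [gtwaRec_cons]
  simp only [List.isEmpty_cons, Bool.false_eq_true, if_false, gtwaRec_two]
  exact foldl_cons_step m (fun x => x) _ []

theorem getTotalWordArray_eq_flatMap (m s t : List String) :
    getTotalWordArray m s t
      = m.flatMap (fun x => x ::
          s.flatMap (fun y => (x ++ " " ++ y) :: t.map (fun z => x ++ " " ++ y ++ " " ++ z))) := by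
  unfold getTotalWordArray
  simp only [PySem.List.foldl_append_singleton_eq_map, foldl_cons_step]
  simp

-- ===== VERDICT (by name: the statement is the Claim_ definition above) =====
theorem getTotalWordArray_spec : Claim_equal_getTotalWordArray := by
  intro m s t _
  unfold Spec_getTotalWordArray getTotalWordArray_alt
  rw [getTotalWordArray_eq_flatMap, gtwaRec_three]
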